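-- pv_equiv track=rewrite | github.com/cmfranca34-alt/camila_franca_exerciciostpsi0226 | EXERCICIOS/Ex1 Exercicio Validação de Nome.py | validar_nome
-- ===== SOURCE A (Python) =====
-- def validar_nome(nome):
--     # Um nome vazio não é válido
--     if len(nome) == 0:
--         return False, "Nome inválido: o nome não pode estar vazio."
--
--     espaco_anterior = True  # Começa como True para validar a 1ª letra
--
--     for i in range(len(nome)):
--         c = nome[i]
--         codigo = ord(c)
--
--         # Verificar se é espaço
--         if c == " ":
--             espaco_anterior = True
--             continue
--
--         # Verificar se é letra (maiúscula: 65-90, minúscula: 97-122)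
--         e_maiuscula = 65 <= codigo <= 90
--         e_minuscula = 97 <= codigo <= 122
--
--         if not e_maiuscula and not e_minuscula:
--             # Não é letra nem espaço → inválido
--             return False, f"Nome inválido: contém caracteres não permitidos."
--
--         # Se vem a seguir a um espaço (ou é o primeiro caractere),
--         # tem de ser maiúscula
--         if espaco_anterior:
--             if not e_maiuscula:
--                 return False, f"Nome inválido: contém caracteres não permitidos."
--             espaco_anterior = False
--         else:
--             # No meio de uma palavra tem de ser minúscula
--             if not e_minuscula:
--                 return False, f"Nome inválido: contém caracteres não permitidos."
--
--     return True, "Nome válido!"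
-- ===== SOURCE B (Python) =====
-- def validar_nome(nome):
--     if len(nome) == 0:
--         return False, "Nome inválido: o nome não pode estar vazio."
--     for palavra in nome.split(" "):
--         if palavra == "":
--             continue
--         if not (65 <= ord(palavra[0]) <= 90):
--             return False, "Nome inválido: contém caracteres não permitidos."
--         for ch in palavra[1:]:
--             if not (97 <= ord(ch) <= 122):
--                 return False, "Nome inválido: contém caracteres não permitidos."
--     return True, "Nome válido!"
-- ===== Notes on version B (the rewrite author's own statement) =====
-- stated objective: simpler
-- what changed: Replaced the flat per-character state machine with an espaco_anterior flag by splitting the name on spaces and checking each word (uppercase first letter, lowercase rest, empty words skipped).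
import Mathlib
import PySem

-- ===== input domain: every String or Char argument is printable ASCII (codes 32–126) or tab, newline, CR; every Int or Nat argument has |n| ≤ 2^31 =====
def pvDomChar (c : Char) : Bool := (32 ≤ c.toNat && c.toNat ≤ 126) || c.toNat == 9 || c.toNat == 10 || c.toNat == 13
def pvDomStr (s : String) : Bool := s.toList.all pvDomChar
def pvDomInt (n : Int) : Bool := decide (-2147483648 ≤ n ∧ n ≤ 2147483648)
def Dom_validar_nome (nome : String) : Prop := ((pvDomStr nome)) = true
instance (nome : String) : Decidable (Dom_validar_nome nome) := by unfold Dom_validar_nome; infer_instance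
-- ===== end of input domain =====

-- B replaces A's per-character state machine by split-on-space then a per-word check: same return value, simpler decomposition.

-- ===== PORT A =====
-- the for-i loop with early returns, as structural recursion over the characters carrying the espaco_anterior flag
def pvGoA : List Char → Bool → Bool × String
  | [], _ => (true, "Nome válido!")
  | c :: rest, esp =>
    let codigo := c.toNat
    if c = ' ' then pvGoA rest true
    else if ¬(65 ≤ codigo ∧ codigo ≤ 90) ∧ ¬(97 ≤ codigo ∧ codigo ≤ 122) then
      (false, "Nome inválido: contém caracteres não permitidos.")
    else if esp then
      if ¬(65 ≤ codigo ∧ codigo ≤ 90) then (false, "Nome inválido: contém caracteres não permitidos.")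
      else pvGoA rest false
    else
      if ¬(97 ≤ codigo ∧ codigo ≤ 122) then (false, "Nome inválido: contém caracteres não permitidos.")
      else pvGoA rest false

def validar_nome (nome : String) : Bool × String :=
  if PySem.Str.len nome = 0 then (false, "Nome inválido: o nome não pode estar vazio.")
  else pvGoA nome.toList true

-- ===== PORT B =====
def pvLowerOk (c : Char) : Bool := decide (97 ≤ c.toNat) && decide (c.toNat ≤ 122)

-- the for-palavra loop with early returns; the inner for-ch loop is the short-circuit List.all
def pvGoB : List (List Char) → Bool × String
  | [] => (true, "Nome válido!")
  | w :: ws =>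
    match w with
    | [] => pvGoB ws
    | c :: tail =>
      if 65 ≤ c.toNat ∧ c.toNat ≤ 90 then
        if tail.all pvLowerOk then pvGoB ws
        else (false, "Nome inválido: contém caracteres não permitidos.")
      else (false, "Nome inválido: contém caracteres não permitidos.")

def validar_nome_alt (nome : String) : Bool × String :=
  if PySem.Str.len nome = 0 then (false, "Nome inválido: o nome não pode estar vazio.")
  else pvGoB (PySem.Chars.splitOn nome.toList [' '])

-- ===== PRECONDITION & SPEC =====
def Spec_validar_nome (nome : String) (out : Bool × String) : Prop := out = validar_nome_alt nome
instance (nome : String) (out : Bool × String) : Decidable (Spec_validar_nome nome out) := by unfold Spec_validar_nome; infer_instance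

-- ===== CLAIM (what is proved, stated in full; the proofs are below) =====
def Claim_equal_validar_nome : Prop := ∀ (nome : String), Dom_validar_nome nome → Spec_validar_nome nome (validar_nome nome)

-- ===== LEMMAS AND PROOFS =====

-- proof-side model of split(" ")
def pvMapHead (f : List Char → List Char) : List (List Char) → List (List Char)
  | [] => []
  | x :: xs => f x :: xs

def pvSplit : List Char → List (List Char)
  | [] => [[]]
  | c :: rest => if c = ' ' then [] :: pvSplit rest else pvMapHead (c :: ·) (pvSplit rest)

theorem pvSplit_ne_nil (cs : List Char) : pvSplit cs ≠ [] := by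
  induction cs with
  | nil => simp [pvSplit]
  | cons c rest ih =>
    simp only [pvSplit]
    split
    · simp
    · cases h : pvSplit rest with
      | nil => exact absurd h ih
      | cons w ws => simp [pvMapHead]

theorem pvGo_eq (l : List Char) : ∀ (fuel : Nat) (cur : List Char) (acc : List (List Char)),
    l.length ≤ fuel →
    PySem.Chars.splitOn.go [' '] fuel l cur acc
      = acc.reverse ++ pvMapHead (cur.reverse ++ ·) (pvSplit l) := by
  induction l with
  | nil =>
    intro fuel cur acc _
    cases fuel <;> simp [PySem.Chars.splitOn.go, pvSplit, pvMapHead]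
  | cons c rest ih =>
    intro fuel cur acc hle
    cases fuel with
    | zero => simp at hle
    | succ fuel =>
      by_cases hc : c = ' '
      · subst hc
        rw [show PySem.Chars.splitOn.go [' '] (fuel+1) (' ' :: rest) cur acc
              = PySem.Chars.splitOn.go [' '] fuel rest [] (cur.reverse :: acc) by
            simp [PySem.Chars.splitOn.go, List.isPrefixOf]]
        rw [ih fuel [] (cur.reverse :: acc) (by simpa using Nat.lt_succ_iff.mp (by simpa using hle))]
        cases h : pvSplit rest with
        | nil => exact absurd h (pvSplit_ne_nil rest)
        | cons w ws => simp [pvSplit, pvMapHead, h]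
      · rw [show PySem.Chars.splitOn.go [' '] (fuel+1) (c :: rest) cur acc
              = PySem.Chars.splitOn.go [' '] fuel rest (c :: cur) acc by
            simp [PySem.Chars.splitOn.go, List.isPrefixOf, (Ne.symm hc)]]
        rw [ih fuel (c :: cur) acc (by simpa using Nat.lt_succ_iff.mp (by simpa using hle))]
        cases h : pvSplit rest with
        | nil => exact absurd h (pvSplit_ne_nil rest)
        | cons w ws => simp [pvSplit, pvMapHead, h, hc]

theorem pvSplitOn_eq (cs : List Char) : PySem.Chars.splitOn cs [' '] = pvSplit cs := by
  rw [PySem.Chars.splitOn, pvGo_eq cs (cs.length + 1) [] [] (Nat.le_succ _)]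
  cases h : pvSplit cs with
  | nil => exact absurd h (pvSplit_ne_nil cs)
  | cons w ws => simp [pvMapHead]

def pvGoBtail : List (List Char) → Bool × String
  | [] => (true, "Nome válido!")
  | w :: ws =>
    if w.all pvLowerOk then pvGoB ws
    else (false, "Nome inválido: contém caracteres não permitidos.")

theorem pvMain (cs : List Char) :
    pvGoA cs true = pvGoB (pvSplit cs) ∧ pvGoA cs false = pvGoBtail (pvSplit cs) := by
  induction cs with
  | nil => simp [pvGoA, pvSplit, pvGoB, pvGoBtail]
  | cons c rest ih =>
    obtain ⟨ih1, ih2⟩ := ih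
    by_cases hc : c = ' '
    · subst hc
      constructor
      · simp [pvGoA, pvSplit, pvGoB, ih1]
      · simp [pvGoA, pvSplit, pvGoBtail, ih1]
    · obtain ⟨w, ws, h⟩ : ∃ w ws, pvSplit rest = w :: ws := by
        cases h : pvSplit rest with
        | nil => exact absurd h (pvSplit_ne_nil rest)
        | cons w ws => exact ⟨w, ws, rfl⟩
      have hs : pvSplit (c :: rest) = (c :: w) :: ws := by
        simp [pvSplit, hc, pvMapHead, h]
      by_cases hup : 65 ≤ c.toNat ∧ c.toNat ≤ 90
      · -- uppercase first char
        have hlo : ¬(97 ≤ c.toNat ∧ c.toNat ≤ 122) := by omega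
        constructor
        · rw [hs]
          simp only [pvGoA, pvGoB, if_neg hc]
          rw [ih2, h]
          simp [hup, hlo, pvGoBtail, pvLowerOk]
        · rw [hs]
          simp only [pvGoA, pvGoBtail, if_neg hc]
          simp [hup, hlo, pvLowerOk, List.all_cons]
      · by_cases hlo : 97 ≤ c.toNat ∧ c.toNat ≤ 122
        · -- lowercase first char
          constructor
          · rw [hs]
            simp only [pvGoA, pvGoB, if_neg hc]
            simp [hup, hlo]
          · rw [hs]
            simp only [pvGoA, pvGoBtail, if_neg hc]
            rw [ih2, h]
            simp [hup, hlo, pvGoBtail, pvLowerOk]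
        · -- not a letter
          constructor
          · rw [hs]
            simp only [pvGoA, pvGoB, if_neg hc]
            simp [hup, hlo]
          · rw [hs]
            simp only [pvGoA, pvGoBtail, if_neg hc]
            simp [hup, hlo, pvLowerOk, List.all_cons]

-- ===== VERDICT (by name: the statement is the Claim_ definition above) =====
theorem validar_nome_spec : Claim_equal_validar_nome := by
  intro nome _
  unfold Spec_validar_nome validar_nome validar_nome_alt
  split
  · rfl
  · rw [pvSplitOn_eq, (pvMain nome.toList).1]
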